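-- pv_equiv track=rewrite | github.com/KWeselski/pygame_paper_soccer | main.py | name_moves
-- ===== SOURCE A (Python) =====
-- def name_moves(list_moves):
--     dict_moves = {}
--     for x in list_moves:
--         if x == (-50,50):
--             dict_moves['7'] = x
--         if x == (0,50):
--             dict_moves['8'] = x
--         if x == (50,50):
--             dict_moves['9'] = x
--         if x == (-50,0):
--             dict_moves['4'] = x
--         if x == (50,0):
--             dict_moves['6'] = x
--         if x == (-50,-50):
--             dict_moves['1'] = x
--         if x == (0,-50):
--             dict_moves['2'] = x
--         if x == (50,-50):
--             dict_moves['3'] = x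
--     return dict_moves
-- ===== SOURCE B (Python) =====
-- def name_moves(list_moves):
--     # Stage 1: distinct moves in first-occurrence order, kept only when they are
--     # a one-step king move on the 50px grid (both coords in {-50,0,50}, not the null move).
--     directions = [(x, y) for (x, y) in dict.fromkeys(list_moves)
--                   if x in (-50, 0, 50) and y in (-50, 0, 50) and (x, y) != (0, 0)]
--     # Stage 2: name each direction arithmetically from numpad geometry
--     # (digit = 5 + dx/50 + 3*dy/50), instead of enumerating the eight cases.
--     return {str(5 + x // 50 + 3 * (y // 50)): (x, y) for (x, y) in directions}
-- ===== Notes on version B (the rewrite author's own statement) =====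
-- stated objective: alternative
-- what changed: Replaces the per-element cascade of eight equality checks and dict assignments with a two-stage pipeline: dedupe the input in first-occurrence order, filter to grid-unit directions, then name each by the closed-form numpad formula str(5 + dx//50 + 3*(dy//50)) instead of any eight-way table.
import Mathlib
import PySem

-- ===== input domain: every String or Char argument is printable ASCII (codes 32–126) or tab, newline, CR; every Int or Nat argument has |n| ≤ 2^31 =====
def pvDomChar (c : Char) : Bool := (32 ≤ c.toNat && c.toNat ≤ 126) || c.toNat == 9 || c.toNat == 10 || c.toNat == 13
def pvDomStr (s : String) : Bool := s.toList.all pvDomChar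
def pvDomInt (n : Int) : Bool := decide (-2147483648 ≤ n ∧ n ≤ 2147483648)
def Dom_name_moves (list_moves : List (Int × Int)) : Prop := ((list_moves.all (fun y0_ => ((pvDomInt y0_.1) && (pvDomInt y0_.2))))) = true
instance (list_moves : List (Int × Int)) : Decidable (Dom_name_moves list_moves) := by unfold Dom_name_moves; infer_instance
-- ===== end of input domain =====

-- B replaces A's per-element cascade of eight if-statements with a two-stage
-- pipeline: ordered dedup, geometric filter, and a closed-form numpad-digit
-- formula 5 + dx//50 + 3*(dy//50) in place of any eight-way table (objective: alternative).


-- ===== PORT A =====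
-- the loop body: eight independent 'if x == (dx,dy): dict_moves[name] = x' statements
def nameMovesStepA (d : PySem.Dict String (Int × Int)) (x : Int × Int) :
    PySem.Dict String (Int × Int) :=
  let d := if x = (-50, 50) then d.insert "7" x else d
  let d := if x = (0, 50) then d.insert "8" x else d
  let d := if x = (50, 50) then d.insert "9" x else d
  let d := if x = (-50, 0) then d.insert "4" x else d
  let d := if x = (50, 0) then d.insert "6" x else d
  let d := if x = (-50, -50) then d.insert "1" x else d
  let d := if x = (0, -50) then d.insert "2" x else d
  let d := if x = (50, -50) then d.insert "3" x else d
  d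

def name_moves (list_moves : List (Int × Int)) : List (String × Int × Int) :=
  (list_moves.foldl nameMovesStepA PySem.Dict.empty).items

-- ===== PORT B =====
-- 'x in (-50, 0, 50) and y in (-50, 0, 50) and (x, y) != (0, 0)'
def validDir (v : Int × Int) : Bool :=
  (v.1 == -50 || v.1 == 0 || v.1 == 50) &&
  (v.2 == -50 || v.2 == 0 || v.2 == 50) && !(v == (0, 0))

-- 'str(5 + x // 50 + 3 * (y // 50))'
def nameOf (v : Int × Int) : String :=
  PySem.Int.toStr (5 + PySem.Int.floordiv v.1 50 + 3 * PySem.Int.floordiv v.2 50)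

def name_moves_alt (list_moves : List (Int × Int)) : List (String × Int × Int) :=
  let directions := (PySem.List.dedup list_moves).filter validDir
  (directions.foldl (fun d v => d.insert (nameOf v) v) PySem.Dict.empty).items

-- ===== PRECONDITION & SPEC =====
def Spec_name_moves (list_moves : List (Int × Int)) (out : List (String × Int × Int)) : Prop := out = name_moves_alt list_moves
instance (list_moves : List (Int × Int)) (out : List (String × Int × Int)) : Decidable (Spec_name_moves list_moves out) := by unfold Spec_name_moves; infer_instance

-- ===== CLAIM (what is proved, stated in full; the proofs are below) =====
def Claim_equal_name_moves : Prop := ∀ (list_moves : List (Int × Int)), Dom_name_moves list_moves → Spec_name_moves list_moves (name_moves list_moves)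

-- ===== LEMMAS AND PROOFS =====
-- the eight valid direction vectors
def dirList : List (Int × Int) :=
  [(-50, 50), (0, 50), (50, 50), (-50, 0), (50, 0), (-50, -50), (0, -50), (50, -50)]

theorem valid_mem (v : Int × Int) (h : validDir v = true) : v ∈ dirList := by
  obtain ⟨x, y⟩ := v
  simp [validDir] at h
  obtain ⟨⟨hx, hy⟩, h0⟩ := h
  rcases hx with (rfl | rfl) | rfl <;> rcases hy with (rfl | rfl) | rfl <;>
    simp_all [dirList]

theorem name_inj (u v : Int × Int) (hu : validDir u = true) (hv : validDir v = true)
    (h : nameOf u = nameOf v) : u = v := by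
  have hu' := valid_mem u hu
  have hv' := valid_mem v hv
  simp [dirList] at hu' hv'
  rcases hu' with rfl | rfl | rfl | rfl | rfl | rfl | rfl | rfl <;>
    rcases hv' with rfl | rfl | rfl | rfl | rfl | rfl | rfl | rfl <;>
    first | rfl | exact absurd h (by decide)

theorem stepA_char (d : PySem.Dict String (Int × Int)) (x : Int × Int) :
    nameMovesStepA d x = if validDir x then d.insert (nameOf x) x else d := by
  by_cases h : validDir x = true
  · have hm := valid_mem x h
    simp [dirList] at hm
    rcases hm with rfl | rfl | rfl | rfl | rfl | rfl | rfl | rfl <;>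
      simp [nameMovesStepA, h] <;> rfl
  · have hall : ∀ u ∈ dirList, validDir u = true := by decide
    have hne : ∀ u ∈ dirList, x ≠ u := fun u hu e => h (e ▸ hall u hu)
    simp [dirList] at hne
    obtain ⟨n7, n8, n9, n4, n6, n1, n2, n3⟩ := hne
    simp [nameMovesStepA, h, n7, n8, n9, n4, n6, n1, n2, n3]

theorem fold_char (xs : List (Int × Int)) :
    xs.foldl nameMovesStepA PySem.Dict.empty =
      PySem.Dict.mk (((PySem.List.dedup xs).filter validDir).map (fun v => (nameOf v, v))) := by
  induction xs using List.reverseRecOn with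
  | nil => rfl
  | append_singleton xs x ih =>
    rw [List.foldl_append, List.foldl_cons, List.foldl_nil, ih, stepA_char]
    simp only [PySem.List.dedup_eq_ofList, PySem.Set.ofList_append_singleton]
    by_cases hval : validDir x = true
    · by_cases hmem : x ∈ xs
      · -- x seen before: the re-insert overwrites the same key with the same value
        rw [PySem.Set.add_of_mem (by simp [PySem.Set.mem_ofList, hmem]), if_pos hval]
        have hxL : x ∈ (PySem.Set.ofList xs).filter validDir := by
          simp [List.mem_filter, PySem.Set.mem_ofList, hmem, hval]
        have hcont :
            (PySem.Dict.mk (((PySem.Set.ofList xs).filter validDir).map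
              (fun v => (nameOf v, v)))).contains (nameOf x) = true := by
          rw [PySem.Dict.contains_eq_decide_mem_keys]
          simp only [PySem.Dict.keys_mk, List.map_map, decide_eq_true_eq]
          exact List.mem_map.mpr ⟨x, hxL, rfl⟩
        apply PySem.Dict.ext
        rw [PySem.Dict.items_insert_of_contains _ _ hcont]
        rw [List.map_map]
        apply List.map_congr_left
        intro u hu
        have huval : validDir u = true := (List.mem_filter.mp hu).2
        by_cases he : nameOf u = nameOf x
        · have : u = x := name_inj u x huval hval he
          subst this
          simp
        · simp [Function.comp, he]
      · -- x is new: both sides append the fresh pair (nameOf x, x)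
        rw [PySem.Set.add_of_not_mem (by simp [PySem.Set.mem_ofList, hmem]), if_pos hval]
        have hfresh :
            (PySem.Dict.mk (((PySem.Set.ofList xs).filter validDir).map
              (fun v => (nameOf v, v)))).contains (nameOf x) = false := by
          rw [PySem.Dict.contains_eq_decide_mem_keys]
          simp only [PySem.Dict.keys_mk, List.map_map, decide_eq_false_iff_not]
          intro hmm
          obtain ⟨u, hu, he⟩ := List.mem_map.mp hmm
          have huval : validDir u = true := (List.mem_filter.mp hu).2
          have : u = x := name_inj u x huval hval he
          subst this
          exact hmem ((PySem.Set.mem_ofList _ _).mp (List.mem_filter.mp hu).1)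
        apply PySem.Dict.ext
        rw [PySem.Dict.items_insert_of_not_contains _ _ hfresh]
        simp [List.filter_append, hval]
    · -- invalid move: A's loop body leaves the dict unchanged; B's filter drops x
      rw [if_neg hval]
      by_cases hmem : x ∈ xs
      · rw [PySem.Set.add_of_mem (by simp [PySem.Set.mem_ofList, hmem])]
      · rw [PySem.Set.add_of_not_mem (by simp [PySem.Set.mem_ofList, hmem])]
        simp [List.filter_append, hval]

theorem name_moves_spec : Claim_equal_name_moves := by
  intro list_moves _
  unfold Spec_name_moves name_moves name_moves_alt
  rw [fold_char]
  have hnodup : ((PySem.List.dedup list_moves).filter validDir).Nodup :=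
    (PySem.List.nodup_dedup list_moves).filter _
  have hkeys :
      (((PySem.List.dedup list_moves).filter validDir).map nameOf).Nodup := by
    refine List.Nodup.map_on ?_ hnodup
    intro u hu v hv he
    exact name_inj u v (List.mem_filter.mp hu).2 (List.mem_filter.mp hv).2 he
  rw [PySem.Dict.items_foldl_insert_fresh _ _ _ _
        (fun a _ => PySem.Dict.contains_empty _) hkeys]
  simp [PySem.Dict.empty]
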